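-- pv_equiv track=rewrite | github.com/rohithajith/project-HAI | backend/ai_agents/checkin_agent.py | should_handle
-- ===== SOURCE A (Python) =====
-- from typing import List, Dict, Any, Optional
--
-- def should_handle(message: str, history: List[Dict[str, Any]]) -> bool:
--     """Determine if this agent should handle the message."""
--     check_in_keywords = [
--         "check in", "check-in", "checking in",
--         "arrive", "arrival", "register",
--         "room key", "book", "booking",
--         "reservation"
--     ]
--
--     message_lower = message.lower()
--     return any(keyword in message_lower for keyword in check_in_keywords)
-- ===== SOURCE B (Python) =====
-- _CHECK_IN_KEYWORDS = [
--     "check in", "check-in", "checking in",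
--     "arrive", "arrival", "register",
--     "room key", "book", "booking",
--     "reservation"
-- ]
--
-- def should_handle(message, history):
--     """Single left-to-right scan: at each position of the lowered message,
--     test whether any keyword starts there."""
--     m = message.lower()
--     for i in range(len(m)):
--         if any(m.startswith(k, i) for k in _CHECK_IN_KEYWORDS):
--             return True
--     return False
-- ===== Notes on version B (the rewrite author's own statement) =====
-- stated objective: alternative
-- what changed: Replaces k independent 'keyword in message' substring scans with one left-to-right scan over the lowered message's suffixes, testing at each position whether some keyword starts there.
import Mathlib
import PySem

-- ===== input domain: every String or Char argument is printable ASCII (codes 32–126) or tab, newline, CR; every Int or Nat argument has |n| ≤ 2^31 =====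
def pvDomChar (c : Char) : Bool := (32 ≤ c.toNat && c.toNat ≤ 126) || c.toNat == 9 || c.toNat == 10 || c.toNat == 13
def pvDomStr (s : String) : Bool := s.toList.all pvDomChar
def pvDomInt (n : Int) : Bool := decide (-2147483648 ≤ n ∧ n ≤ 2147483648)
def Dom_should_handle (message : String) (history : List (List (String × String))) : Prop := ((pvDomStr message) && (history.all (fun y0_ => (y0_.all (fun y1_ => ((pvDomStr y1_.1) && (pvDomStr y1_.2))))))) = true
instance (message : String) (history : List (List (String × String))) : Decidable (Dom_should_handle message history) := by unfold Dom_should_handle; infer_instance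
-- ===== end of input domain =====

-- B replaces the k independent `keyword in message` substring scans with one
-- left-to-right scan over the lowered message's suffixes (alternative, same cost class).

-- ===== PORT A =====
def checkInKeywords : List String :=
  ["check in", "check-in", "checking in",
   "arrive", "arrival", "register",
   "room key", "book", "booking",
   "reservation"]

def should_handle (message : String) (history : List (List (String × String))) : Bool :=
  let message_lower := PySem.Str.lower message
  checkInKeywords.any (fun keyword => PySem.Str.isIn keyword message_lower)

-- ===== PORT B =====
def altKeywords : List (List Char) :=
  ["check in".toList, "check-in".toList, "checking in".toList,
   "arrive".toList, "arrival".toList, "register".toList,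
   "room key".toList, "book".toList, "booking".toList,
   "reservation".toList]

-- the index loop of Source B: at each position (= suffix), test startswith for every keyword
def altScan : List Char → Bool
  | [] => false
  | c :: rest =>
      if altKeywords.any (fun k => PySem.Chars.startswith (c :: rest) k) then true
      else altScan rest

def should_handle_alt (message : String) (history : List (List (String × String))) : Bool :=
  altScan (PySem.Chars.lower message.toList)

-- ===== PRECONDITION & SPEC =====
def Spec_should_handle (message : String) (history : List (List (String × String))) (out : Bool) : Prop := out = should_handle_alt message history
instance (message : String) (history : List (List (String × String))) (out : Bool) : Decidable (Spec_should_handle message history out) := by unfold Spec_should_handle; infer_instance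

-- ===== CLAIM (what is proved, stated in full; the proofs are below) =====
def Claim_equal_should_handle : Prop := ∀ (message : String) (history : List (List (String × String))), Dom_should_handle message history → Spec_should_handle message history (should_handle message history)

-- ===== LEMMAS AND PROOFS =====

theorem altScan_iff (s : List Char) :
    altScan s = true ↔ ∃ k ∈ altKeywords, PySem.Chars.isIn k s = true := by
  induction s with
  | nil =>
      simp only [altScan]
      refine iff_of_false (by simp) ?_
      rintro ⟨k, hk, hin⟩
      rw [PySem.Chars.isIn_iff_infix] at hin
      have : k = [] := List.eq_nil_of_infix_nil hin
      subst this
      revert hk; decide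
  | cons c rest ih =>
      simp only [altScan]
      split
      · rename_i h
        rw [List.any_eq_true] at h
        obtain ⟨k, hk, hsw⟩ := h
        rw [PySem.Chars.startswith_iff] at hsw
        exact iff_of_true rfl ⟨k, hk, by
          rw [PySem.Chars.isIn_iff_infix]; exact hsw.isInfix⟩
      · rename_i h
        simp only [List.any_eq_true, not_exists, not_and, Bool.not_eq_true] at h
        rw [ih]
        constructor
        · rintro ⟨k, hk, hin⟩
          refine ⟨k, hk, ?_⟩
          rw [PySem.Chars.isIn_iff_infix] at hin ⊢
          exact hin.trans (List.suffix_cons c rest).isInfix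
        · rintro ⟨k, hk, hin⟩
          refine ⟨k, hk, ?_⟩
          rw [PySem.Chars.isIn_iff_infix] at hin ⊢
          rcases (List.infix_cons_iff.mp hin) with hp | hi
          · have ht : PySem.Chars.startswith (c :: rest) k = true := by
              rw [PySem.Chars.startswith_iff]; exact hp
            simp [h k hk] at ht
          · exact hi

theorem altKeywords_eq_map : altKeywords = checkInKeywords.map String.toList := by
  decide

theorem should_handle_iff (message : String) :
    should_handle message [] = true ↔
      ∃ k ∈ altKeywords, PySem.Chars.isIn k (PySem.Chars.lower message.toList) = true := by
  simp only [should_handle, List.any_eq_true, altKeywords_eq_map, List.mem_map]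
  constructor
  · rintro ⟨kw, hk, hin⟩
    exact ⟨kw.toList, ⟨kw, hk, rfl⟩, by simpa [PySem.Str.isIn, PySem.Str.lower] using hin⟩
  · rintro ⟨k, ⟨kw, hk, hke⟩, hin⟩
    subst hke
    exact ⟨kw, hk, by simpa [PySem.Str.isIn, PySem.Str.lower] using hin⟩

-- ===== VERDICT (by name: the statement is the Claim_ definition above) =====
theorem should_handle_spec : Claim_equal_should_handle := by
  intro message history _
  unfold Spec_should_handle
  have hA : should_handle message history = should_handle message [] := rfl
  rw [hA]
  rcases hb : should_handle_alt message history with _ | _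
  · rcases ha : should_handle message [] with _ | _
    · rfl
    · exfalso
      have := (should_handle_iff message).mp ha
      have hb' : altScan (PySem.Chars.lower message.toList) = false := hb
      rw [← Bool.not_eq_true, altScan_iff] at hb'
      exact hb' this
  · exact (should_handle_iff message).mpr ((altScan_iff _).mp hb)
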